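-- pv_equiv track=rewrite | github.com/chomh168/beakjoon | programmers/p_탐욕_2/solve.py | solve
-- ===== SOURCE A (Python) =====
-- def solve(name):
--     minChar = ord("A")
--     maxChar = ord("Z")
--     count = 0
--
--     cursorCount = len(name) - 1
--     subIdx = 0
--
--     for idx, each in enumerate(name):
--         nowChar = ord(each)
--         count += min(nowChar-minChar, maxChar-nowChar+1)
--
--         subIdx = idx + 1
--         while subIdx < len(name):
--             if name[subIdx] == "A":
--                 subIdx += 1
--             else:
--                 cursorCount = min(cursorCount, idx * 2 + len(name) - subIdx)
--                 cursorCount = min(cursorCount, idx + (len(name) - subIdx) * 2)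
--                 # 처음부터 뒤에서 탐색
--                 break
--
--         if subIdx == len(name):
--             cursorCount = min(cursorCount, len(name) - (subIdx - idx))
--
--     return count + cursorCount
-- ===== SOURCE B (Python) =====
-- def solve(name):
--     n = len(name)
--     count = sum(min(ord(c) - 65, 91 - ord(c)) for c in name)
--     best = n - 1
--     j = n  # nearest non-'A' index strictly to the right of the current idx
--     for idx in reversed(range(n)):
--         if j < n:
--             best = min(best, idx * 2 + n - j, idx + 2 * (n - j))
--         else:
--             best = min(best, idx)
--         if name[idx] != 'A':
--             j = idx
--     return count + best
-- ===== Notes on version B (the rewrite author's own statement) =====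
-- stated objective: alternative
-- what changed: Replaced the forward pass whose inner loop rescans ahead for the next position still needing horizontal cursor travel by a single backward pass that carries that next index in O(1) state; the per-letter alphabet cost becomes a one-line sum.
import Mathlib
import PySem

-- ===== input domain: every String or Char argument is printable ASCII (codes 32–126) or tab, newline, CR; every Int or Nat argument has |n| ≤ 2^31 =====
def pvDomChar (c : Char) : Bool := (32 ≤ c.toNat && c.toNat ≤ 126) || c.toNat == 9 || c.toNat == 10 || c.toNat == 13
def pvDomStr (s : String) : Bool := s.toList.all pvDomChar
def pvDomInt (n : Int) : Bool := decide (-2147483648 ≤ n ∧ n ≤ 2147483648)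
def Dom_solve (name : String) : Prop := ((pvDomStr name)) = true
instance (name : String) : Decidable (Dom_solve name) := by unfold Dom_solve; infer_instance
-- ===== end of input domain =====

-- B replaces A's forward scan (with its inner search for the next position needing cursor travel) by a single backward pass carrying
-- that index in O(1) state (objective: alternative one-pass algorithm; same return value).

-- ===== PORT A =====
-- the 'while subIdx < len(name): if name[subIdx] == "A": subIdx += 1 else: break' advance
def solveFindSub (cs : List Char) (subIdx : Int) : Int :=
  if subIdx < (cs.length : Int) then
    if PySem.List.pyGetD cs subIdx 'A' == 'A' then solveFindSub cs (subIdx + 1) else subIdx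
  else subIdx
termination_by ((cs.length : Int) - subIdx).toNat
decreasing_by omega

def solve (name : String) : Int :=
  let cs := name.toList
  let n : Int := cs.length
  let r := (PySem.List.enumerate cs 0).foldl
    (fun (st : Int × Int) (p : Int × Char) =>
      let idx := p.1
      let nowChar : Int := p.2.toNat
      let count := st.1 + min (nowChar - 65) (90 - nowChar + 1)
      let subIdx := solveFindSub cs (idx + 1)
      let cursor :=
        if subIdx < n then
          min (min st.2 (idx * 2 + n - subIdx)) (idx + (n - subIdx) * 2)
        else st.2
      let cursor := if subIdx == n then min cursor (n - (subIdx - idx)) else cursor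
      (count, cursor))
    (0, n - 1)
  r.1 + r.2

-- ===== PORT B =====
def solve_alt (name : String) : Int :=
  let cs := name.toList
  let n : Int := cs.length
  let count := (cs.map (fun c => min ((c.toNat : Int) - 65) (91 - (c.toNat : Int)))).sum
  let r := ((PySem.List.pyRange 0 n 1).reverse).foldl
    (fun (st : Int × Int) (idx : Int) =>
      let best :=
        if st.2 < n then
          min (min st.1 (idx * 2 + n - st.2)) (idx + 2 * (n - st.2))
        else min st.1 idx
      let j := if PySem.List.pyGetD cs idx 'A' != 'A' then idx else st.2
      (best, j))
    (n - 1, n)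
  count + r.1

-- ===== PRECONDITION & SPEC =====
def Spec_solve (name : String) (out : Int) : Prop := out = solve_alt name
instance (name : String) (out : Int) : Decidable (Spec_solve name out) := by unfold Spec_solve; infer_instance

-- ===== CLAIM (what is proved, stated in full; the proofs are below) =====
def Claim_equal_solve : Prop := ∀ (name : String), Dom_solve name → Spec_solve name (solve name)

-- ===== LEMMAS AND PROOFS =====

-- the per-index candidate of the cursor minimisation, shared by both programs
def tCand (cs : List Char) (idx : Int) : Int :=
  let n : Int := cs.length
  let s := solveFindSub cs (idx + 1)
  if s < n then min (idx * 2 + n - s) (idx + (n - s) * 2) else idx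

theorem solveFindSub_ge (cs : List Char) (i : Int) : i ≤ solveFindSub cs i := by
  rw [solveFindSub]
  split
  · split
    · have h := solveFindSub_ge cs (i + 1); omega
    · omega
  · omega
termination_by ((cs.length : Int) - i).toNat
decreasing_by omega

theorem solveFindSub_le (cs : List Char) (i : Int) (h : i ≤ (cs.length : Int)) :
    solveFindSub cs i ≤ (cs.length : Int) := by
  rw [solveFindSub]
  split
  · split
    · exact solveFindSub_le cs (i + 1) (by omega)
    · omega
  · omega
termination_by ((cs.length : Int) - i).toNat
decreasing_by omega

theorem solveFindSub_of_ge (cs : List Char) (i : Int) (h : (cs.length : Int) ≤ i) :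
    solveFindSub cs i = i := by
  rw [solveFindSub, if_neg (by omega)]

-- foldl of min over a list is insensitive to lifting a min into the seed
theorem foldl_min_seed (t : Int → Int) (l : List Int) (b y : Int) :
    l.foldl (fun c i => min c (t i)) (min b y) = min (l.foldl (fun c i => min c (t i)) b) y := by
  induction l generalizing b with
  | nil => rfl
  | cons x l ih =>
      simp only [List.foldl_cons]
      rw [min_right_comm, ih]

theorem foldl_min_reverse (t : Int → Int) (l : List Int) (b : Int) :
    l.reverse.foldl (fun c i => min c (t i)) b = l.foldl (fun c i => min c (t i)) b := by
  induction l generalizing b with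
  | nil => rfl
  | cons x l ih =>
      simp only [List.reverse_cons, List.foldl_append, List.foldl_cons, List.foldl_nil]
      rw [ih, ← foldl_min_seed]

-- B's backward loop computes the same min-fold (invariant: its j equals solveFindSub cs (idx+1))
theorem bLoop (cs : List Char) (k : Nat) (hk : k ≤ cs.length) (best : Int) :
    ((PySem.List.pyRange 0 (k : Int) 1).reverse).foldl
      (fun (st : Int × Int) (idx : Int) =>
        (if st.2 < (cs.length : Int) then
            min (min st.1 (idx * 2 + (cs.length : Int) - st.2)) (idx + 2 * ((cs.length : Int) - st.2))
          else min st.1 idx,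
         if PySem.List.pyGetD cs idx 'A' != 'A' then idx else st.2))
      (best, solveFindSub cs (k : Int))
    = (((PySem.List.pyRange 0 (k : Int) 1).reverse).foldl
        (fun c i => min c (tCand cs i)) best,
       solveFindSub cs 0) := by
  induction k generalizing best with
  | zero =>
      simp only [Nat.cast_zero, PySem.List.pyRange_one_eq_nil (by omega : (0:Int) ≤ 0),
        List.reverse_nil, List.foldl_nil]
  | succ k ih =>
      have hk' : k ≤ cs.length := by omega
      have hkn : (k : Int) < (cs.length : Int) := by exact_mod_cast hk
      have hrange : PySem.List.pyRange 0 ((k:Int) + 1) 1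
          = PySem.List.pyRange 0 (k:Int) 1 ++ [(k:Int)] :=
        PySem.List.pyRange_one_succ_right (by omega)
      have hcast : (((k + 1 : Nat)) : Int) = (k : Int) + 1 := by push_cast; ring
      rw [hcast, hrange]
      simp only [List.reverse_append, List.reverse_cons, List.reverse_nil, List.nil_append,
        List.cons_append, List.foldl_cons]
      -- the step at idx = k
      have hs_le : solveFindSub cs ((k:Int) + 1) ≤ (cs.length : Int) :=
        solveFindSub_le cs _ (by omega)
      have hbest : (if solveFindSub cs ((k:Int) + 1) < (cs.length : Int) then
            min (min best ((k:Int) * 2 + (cs.length : Int) - solveFindSub cs ((k:Int) + 1)))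
              ((k:Int) + 2 * ((cs.length : Int) - solveFindSub cs ((k:Int) + 1)))
          else min best (k:Int)) = min best (tCand cs (k:Int)) := by
        unfold tCand
        split
        · rename_i h
          rw [if_pos h]
          have h2 : (k:Int) + 2 * ((cs.length : Int) - solveFindSub cs ((k:Int) + 1))
              = (k:Int) + ((cs.length : Int) - solveFindSub cs ((k:Int) + 1)) * 2 := by ring
          rw [h2, min_assoc]
        · rename_i h
          rw [if_neg h]
      have hj : (if PySem.List.pyGetD cs (k:Int) 'A' != 'A' then (k:Int)
            else solveFindSub cs ((k:Int) + 1)) = solveFindSub cs (k:Int) := by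
        conv_rhs => rw [solveFindSub]
        rw [if_pos hkn]
        have hbne : (PySem.List.pyGetD cs (k:Int) 'A' != 'A')
            = !(PySem.List.pyGetD cs (k:Int) 'A' == 'A') := rfl
        rw [hbne]
        cases h : (PySem.List.pyGetD cs (k:Int) 'A' == 'A') <;> simp_all
      rw [hbest, hj, ih hk']

-- ===== VERDICT (by name: the statement is the Claim_ definition above) =====
-- A's cursor loop, congruent to the min-fold of tCand
theorem aCursor (cs : List Char) (b : Int) :
    (PySem.List.pyRange 0 (cs.length : Int) 1).foldl
      (fun (c : Int) (idx : Int) =>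
        (if solveFindSub cs (idx + 1) < (cs.length : Int) then
            min (min c (idx * 2 + (cs.length : Int) - solveFindSub cs (idx + 1)))
              (idx + ((cs.length : Int) - solveFindSub cs (idx + 1)) * 2)
          else c) |> (fun cur =>
        if solveFindSub cs (idx + 1) == (cs.length : Int) then
          min cur ((cs.length : Int) - (solveFindSub cs (idx + 1) - idx)) else cur))
      b
    = (PySem.List.pyRange 0 (cs.length : Int) 1).foldl (fun c i => min c (tCand cs i)) b := by
  apply PySem.List.foldl_congr_mem
  intro c idx hmem
  have hidx := (PySem.List.mem_pyRange_one).1 hmem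
  have hs_ge : idx + 1 ≤ solveFindSub cs (idx + 1) := solveFindSub_ge cs _
  have hs_le : solveFindSub cs (idx + 1) ≤ (cs.length : Int) :=
    solveFindSub_le cs _ (by omega)
  beta_reduce
  unfold tCand
  by_cases h : solveFindSub cs (idx + 1) < (cs.length : Int)
  · rw [if_pos h, if_pos h, if_neg (by simp only [beq_iff_eq]; omega), min_assoc]
  · have he : solveFindSub cs (idx + 1) = (cs.length : Int) := by omega
    rw [if_neg h, if_neg h, if_pos (by simp only [beq_iff_eq, he]), he]
    have : (cs.length : Int) - ((cs.length : Int) - idx) = idx := by ring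
    rw [this]

theorem solve_spec : Claim_equal_solve := by
  unfold Claim_equal_solve
  intro name _
  unfold Spec_solve solve solve_alt
  simp only []
  rw [PySem.List.foldl_prod_mk
    (f := fun (c : Int) (p : Int × Char) =>
      c + min ((p.2.toNat : Int) - 65) (90 - (p.2.toNat : Int) + 1))
    (g := fun (c : Int) (p : Int × Char) =>
      (if solveFindSub name.toList (p.1 + 1) < (name.toList.length : Int) then
          min (min c (p.1 * 2 + (name.toList.length : Int) - solveFindSub name.toList (p.1 + 1)))
            (p.1 + ((name.toList.length : Int) - solveFindSub name.toList (p.1 + 1)) * 2)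
        else c) |> (fun cur =>
        if solveFindSub name.toList (p.1 + 1) == (name.toList.length : Int) then
          min cur ((name.toList.length : Int) - (solveFindSub name.toList (p.1 + 1) - p.1))
        else cur))]
  have hcnt : (PySem.List.enumerate name.toList 0).foldl
      (fun (c : Int) (p : Int × Char) =>
        c + min ((p.2.toNat : Int) - 65) (90 - (p.2.toNat : Int) + 1)) 0
      = (name.toList.map (fun c => min ((c.toNat : Int) - 65) (91 - (c.toNat : Int)))).sum := by
    rw [show (PySem.List.enumerate name.toList 0).foldl
        (fun (c : Int) (p : Int × Char) =>
          c + min ((p.2.toNat : Int) - 65) (90 - (p.2.toNat : Int) + 1)) 0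
      = ((PySem.List.enumerate name.toList 0).map (·.2)).foldl
          (fun (c : Int) (x : Char) => c + min ((x.toNat : Int) - 65) (90 - (x.toNat : Int) + 1)) 0
      from (List.foldl_map (g := fun (c : Int) (x : Char) =>
          c + min ((x.toNat : Int) - 65) (90 - (x.toNat : Int) + 1))
        (f := fun (p : Int × Char) => p.2)
        (l := PySem.List.enumerate name.toList 0) (init := (0 : Int))).symm]
    rw [PySem.List.map_snd_enumerate, PySem.List.foldl_add, zero_add]
    refine congrArg List.sum (List.map_congr_left ?_)
    intro x _
    omega
  have hcur : (PySem.List.enumerate name.toList 0).foldl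
      (fun (c : Int) (p : Int × Char) =>
        (if solveFindSub name.toList (p.1 + 1) < (name.toList.length : Int) then
            min (min c (p.1 * 2 + (name.toList.length : Int) - solveFindSub name.toList (p.1 + 1)))
              (p.1 + ((name.toList.length : Int) - solveFindSub name.toList (p.1 + 1)) * 2)
          else c) |> (fun cur =>
          if solveFindSub name.toList (p.1 + 1) == (name.toList.length : Int) then
            min cur ((name.toList.length : Int) - (solveFindSub name.toList (p.1 + 1) - p.1))
          else cur)) ((name.toList.length : Int) - 1)
      = (PySem.List.pyRange 0 (name.toList.length : Int) 1).foldl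
          (fun c i => min c (tCand name.toList i)) ((name.toList.length : Int) - 1) := by
    rw [show (PySem.List.enumerate name.toList 0).foldl
        (fun (c : Int) (p : Int × Char) =>
          (if solveFindSub name.toList (p.1 + 1) < (name.toList.length : Int) then
              min (min c (p.1 * 2 + (name.toList.length : Int) - solveFindSub name.toList (p.1 + 1)))
                (p.1 + ((name.toList.length : Int) - solveFindSub name.toList (p.1 + 1)) * 2)
            else c) |> (fun cur =>
            if solveFindSub name.toList (p.1 + 1) == (name.toList.length : Int) then
              min cur ((name.toList.length : Int) - (solveFindSub name.toList (p.1 + 1) - p.1))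
            else cur)) ((name.toList.length : Int) - 1)
      = ((PySem.List.enumerate name.toList 0).map (·.1)).foldl
          (fun (c : Int) (idx : Int) =>
            (if solveFindSub name.toList (idx + 1) < (name.toList.length : Int) then
                min (min c (idx * 2 + (name.toList.length : Int) - solveFindSub name.toList (idx + 1)))
                  (idx + ((name.toList.length : Int) - solveFindSub name.toList (idx + 1)) * 2)
              else c) |> (fun cur =>
              if solveFindSub name.toList (idx + 1) == (name.toList.length : Int) then
                min cur ((name.toList.length : Int) - (solveFindSub name.toList (idx + 1) - idx))
              else cur)) ((name.toList.length : Int) - 1)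
      from (List.foldl_map (g := fun (c : Int) (idx : Int) =>
          (if solveFindSub name.toList (idx + 1) < (name.toList.length : Int) then
              min (min c (idx * 2 + (name.toList.length : Int) - solveFindSub name.toList (idx + 1)))
                (idx + ((name.toList.length : Int) - solveFindSub name.toList (idx + 1)) * 2)
            else c) |> (fun cur =>
            if solveFindSub name.toList (idx + 1) == (name.toList.length : Int) then
              min cur ((name.toList.length : Int) - (solveFindSub name.toList (idx + 1) - idx))
            else cur))
        (f := fun (p : Int × Char) => p.1)
        (l := PySem.List.enumerate name.toList 0)
        (init := (name.toList.length : Int) - 1)).symm]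
    rw [PySem.List.map_fst_enumerate, zero_add]
    exact aCursor name.toList _
  rw [hcnt, hcur]
  have hinit : ((name.toList.length : Int) - 1, (name.toList.length : Int))
      = ((name.toList.length : Int) - 1, solveFindSub name.toList (name.toList.length : Int)) := by
    rw [solveFindSub_of_ge name.toList _ (le_refl _)]
  rw [hinit, bLoop name.toList name.toList.length (le_refl _) ((name.toList.length : Int) - 1)]
  rw [foldl_min_reverse]
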